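-- pv_equiv track=rewrite | github.com/chenly3/StarBI | SQLBot/backend/apps/query_resource_learning/service.py | _is_safe_read_sql
-- ===== SOURCE A (Python) =====
-- from typing import TYPE_CHECKING, Any, TypedDict
--
-- READONLY_SQL_PREFIXES = ("select", "with")
--
-- DANGEROUS_SQL_KEYWORDS = (
--     " insert ",
--     " update ",
--     " delete ",
--     " drop ",
--     " truncate ",
--     " alter ",
--     " create ",
--     " grant ",
--     " revoke ",
--     " merge ",
--     " call ",
--     " execute ",
-- )
--
-- def _normalize_text(value: Any) -> str:
--     return str(value or "").strip()
--
-- def _is_safe_read_sql(statement: str | None) -> bool: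
--     normalized = _normalize_text(statement).lower()
--     if not normalized:
--         return False
--     segments = [segment.strip() for segment in normalized.split(";") if segment.strip()]
--     if len(segments) != 1:
--         return False
--     single_statement = segments[0]
--     if not single_statement.startswith(READONLY_SQL_PREFIXES):
--         return False
--     wrapped = f" {single_statement} "
--     return not any(keyword in wrapped for keyword in DANGEROUS_SQL_KEYWORDS)
-- ===== SOURCE B (Python) =====
-- _DANGEROUS = frozenset((
--     "insert", "update", "delete", "drop", "truncate", "alter",
--     "create", "grant", "revoke", "merge", "call", "execute",
-- ))
--
--
-- def _is_safe_read_sql(statement):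
--     text = str(statement or "").lower().strip()
--     segments = [seg for seg in (part.strip() for part in text.split(";")) if seg]
--     if len(segments) == 1:
--         single = segments[0]
--         if single.startswith("select") or single.startswith("with"):
--             return _DANGEROUS.isdisjoint(single.split(" "))
--     return False
-- ===== Notes on version B (the rewrite author's own statement) =====
-- stated objective: alternative
-- what changed: A's guard cascade with twelve space-wrapped-keyword substring scans is replaced by a positive match on the filtered segment list and a single space-split of the statement whose token list is tested for disjointness with a frozenset of bare dangerous words
import Mathlib
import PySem

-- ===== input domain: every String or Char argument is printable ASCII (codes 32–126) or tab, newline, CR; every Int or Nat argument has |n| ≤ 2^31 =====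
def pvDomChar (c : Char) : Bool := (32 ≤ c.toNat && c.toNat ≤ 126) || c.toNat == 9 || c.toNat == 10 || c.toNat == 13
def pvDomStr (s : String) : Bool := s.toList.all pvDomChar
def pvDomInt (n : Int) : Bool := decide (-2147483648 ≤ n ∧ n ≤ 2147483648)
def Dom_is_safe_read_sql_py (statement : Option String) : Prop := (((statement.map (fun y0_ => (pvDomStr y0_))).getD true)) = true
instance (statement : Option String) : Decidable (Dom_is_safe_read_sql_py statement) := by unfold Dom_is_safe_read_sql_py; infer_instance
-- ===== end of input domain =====

-- B replaces A's guard cascade and twelve " keyword " substring scans by a positive match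
-- on the segment list and one space-split of the statement tested for disjointness with a
-- set of bare dangerous words (objective: alternative).

-- ===== PORT A =====
-- DANGEROUS_SQL_KEYWORDS, each wrapped in spaces as in the Python tuple
def pvDangerousA : List (List Char) :=
  [" insert ".toList, " update ".toList, " delete ".toList, " drop ".toList,
   " truncate ".toList, " alter ".toList, " create ".toList, " grant ".toList,
   " revoke ".toList, " merge ".toList, " call ".toList, " execute ".toList]

-- _normalize_text(statement).lower()  (str(value or "").strip(), then .lower())
def pvNormA (statement : Option String) : List Char :=
  PySem.Chars.lower (PySem.Chars.strip (statement.getD "").toList)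

-- [segment.strip() for segment in normalized.split(";") if segment.strip()]
def pvSegsA (statement : Option String) : List (List Char) :=
  ((PySem.Chars.splitOn (pvNormA statement) [';']).filter
      (fun seg => PySem.Chars.strip seg ≠ [])).map PySem.Chars.strip

def is_safe_read_sql_py (statement : Option String) : Bool :=
  if pvNormA statement = [] then false
  else if (pvSegsA statement).length ≠ 1 then false
  else
    let single := (pvSegsA statement).headD []
    if !(PySem.Chars.startswith single "select".toList
          || PySem.Chars.startswith single "with".toList) then false
    else !(pvDangerousA.any (fun kw => PySem.Chars.isIn kw ([' '] ++ single ++ [' '])))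

-- ===== PORT B =====
-- _DANGEROUS, the frozenset of bare keywords
def pvDangerSet : PySem.Set (List Char) :=
  PySem.Set.ofList
    ["insert".toList, "update".toList, "delete".toList, "drop".toList,
     "truncate".toList, "alter".toList, "create".toList, "grant".toList,
     "revoke".toList, "merge".toList, "call".toList, "execute".toList]

def is_safe_read_sql_py_alt (statement : Option String) : Bool :=
  let text := PySem.Chars.strip (PySem.Chars.lower (statement.getD "").toList)
  let segments := (PySem.Chars.splitOn text [';']).foldr
      (fun part acc => let seg := PySem.Chars.strip part; if seg = [] then acc else seg :: acc) []
  match segments with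
  | [single] =>
      if PySem.Chars.startswith single "select".toList
          || PySem.Chars.startswith single "with".toList then
        PySem.Set.isdisjoint pvDangerSet (PySem.Chars.splitOn single [' '])
      else false
  | _ => false

-- ===== PRECONDITION & SPEC =====
def Spec_is_safe_read_sql_py (statement : Option String) (out : Bool) : Prop := out = is_safe_read_sql_py_alt statement
instance (statement : Option String) (out : Bool) : Decidable (Spec_is_safe_read_sql_py statement out) := by unfold Spec_is_safe_read_sql_py; infer_instance

-- ===== CLAIM (what is proved, stated in full; the proofs are below) =====
def Claim_equal_is_safe_read_sql_py : Prop := ∀ (statement : Option String), Dom_is_safe_read_sql_py statement → Spec_is_safe_read_sql_py statement (is_safe_read_sql_py statement)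

-- ===== LEMMAS AND PROOFS =====

-- the bare dangerous words, as a plain list (proof-side mirror of both constant tables)
def pvDangerousWords : List (List Char) :=
  ["insert".toList, "update".toList, "delete".toList, "drop".toList,
   "truncate".toList, "alter".toList, "create".toList, "grant".toList,
   "revoke".toList, "merge".toList, "call".toList, "execute".toList]

theorem pvDangerousA_eq : pvDangerousA = pvDangerousWords.map (fun w => ' ' :: (w ++ [' '])) := by
  decide

theorem pvDangerSet_eq : pvDangerSet = pvDangerousWords := by decide

theorem pvWords_ok : ∀ w ∈ pvDangerousWords, ' ' ∉ w ∧ w ≠ [] := by decide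

-- no character in 65..122 (letters and the lowercase range) is whitespace
theorem pvIsspace_bounds (d : Char) (h1 : 65 ≤ d.toNat) (h2 : d.toNat ≤ 122) :
    PySem.Chars.isspace d = false := by
  unfold PySem.Chars.isspace
  simp only [Bool.or_eq_false_iff, Bool.and_eq_false_iff, decide_eq_false_iff_not]
  omega

-- lowering a character does not change whether it is whitespace
theorem pvIsspace_lowerChar (c : Char) :
    PySem.Chars.isspace (PySem.Chars.lowerChar c) = PySem.Chars.isspace c := by
  unfold PySem.Chars.lowerChar
  by_cases h : PySem.Chars.isupper c = true
  · have hc : 'A' ≤ c ∧ c ≤ 'Z' := by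
      simpa [PySem.Chars.isupper] using h
    have hn : 65 ≤ c.toNat ∧ c.toNat ≤ 90 := ⟨hc.1, hc.2⟩
    have hvalid : (c.toNat + 32).isValidChar := Or.inl (by omega)
    have hval : (Char.ofNat (c.toNat + 32)).toNat = c.toNat + 32 := by
      rw [Char.toNat_ofNat, if_pos hvalid]
    rw [if_pos h, pvIsspace_bounds _ (by omega) (by omega),
        pvIsspace_bounds c (by omega) (by omega)]
  · simp [h]

-- str.lower() and str.strip() commute
theorem pvStrip_lower (s : List Char) :
    PySem.Chars.strip (PySem.Chars.lower s) = PySem.Chars.lower (PySem.Chars.strip s) := by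
  have hfun : (PySem.Chars.isspace ∘ PySem.Chars.lowerChar) = PySem.Chars.isspace :=
    funext pvIsspace_lowerChar
  unfold PySem.Chars.strip PySem.Chars.lstrip PySem.Chars.rstrip PySem.Chars.lower
  rw [List.dropWhile_map, hfun, ← List.map_reverse, List.dropWhile_map, hfun, List.map_reverse]

-- B's foldr filter-map builds exactly A's comprehension
theorem pvFoldr_segs (l : List (List Char)) :
    l.foldr (fun part acc => let seg := PySem.Chars.strip part;
        if seg = [] then acc else seg :: acc) []
      = (l.filter (fun seg => PySem.Chars.strip seg ≠ [])).map PySem.Chars.strip := by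
  induction l with
  | nil => rfl
  | cons p t ih =>
      by_cases h : PySem.Chars.strip p = [] <;> simp [h, ih]

theorem pvSegs_of_norm_nil (statement : Option String) (h : pvNormA statement = []) :
    pvSegsA statement = [] := by
  unfold pvSegsA
  rw [h]
  rfl

-- the space-delimited tokens of p ++ s, where p is the pending partial token
def pvTokens (p s : List Char) : List (List Char) :=
  match s with
  | [] => [p]
  | c :: t => if c = ' ' then p :: pvTokens [] t else pvTokens (p ++ [c]) t

-- the split worker with enough fuel computes the pending-token recursion
theorem pvGo_space (l : List Char) : ∀ (fuel : Nat) (cur : List Char) (acc : List (List Char)),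
    l.length ≤ fuel →
    PySem.Chars.splitOn.go [' '] fuel l cur acc = acc.reverse ++ pvTokens cur.reverse l := by
  induction l with
  | nil =>
      intro fuel cur acc _
      cases fuel <;> simp [PySem.Chars.splitOn.go, pvTokens]
  | cons c rest ih =>
      intro fuel cur acc hf
      cases fuel with
      | zero => simp at hf
      | succ f =>
          have hrest : rest.length ≤ f := by simpa using hf
          by_cases hc : c = ' '
          · subst hc
            rw [show PySem.Chars.splitOn.go [' '] (f+1) (' ' :: rest) cur acc
                = PySem.Chars.splitOn.go [' '] f rest [] (cur.reverse :: acc) from by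
              simp [PySem.Chars.splitOn.go, List.isPrefixOf]]
            rw [ih f [] (cur.reverse :: acc) hrest]
            simp [pvTokens]
          · rw [show PySem.Chars.splitOn.go [' '] (f+1) (c :: rest) cur acc
                = PySem.Chars.splitOn.go [' '] f rest (c :: cur) acc from by
              simp [PySem.Chars.splitOn.go, List.isPrefixOf, Ne.symm hc]]
            rw [ih f (c :: cur) acc hrest]
            simp [pvTokens, hc]

-- s.split(" ") computes exactly those tokens
theorem pvSplitOn_space (s : List Char) : PySem.Chars.splitOn s [' '] = pvTokens [] s := by
  unfold PySem.Chars.splitOn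
  rw [pvGo_space s (s.length + 1) [] [] (by omega)]
  rfl

theorem pvTokens_append_space (x : List Char) : ∀ (p y : List Char),
    pvTokens p (x ++ ' ' :: y) = pvTokens p x ++ pvTokens [] y := by
  induction x with
  | nil => intro p y; simp [pvTokens]
  | cons c t ih =>
      intro p y
      by_cases hc : c = ' '
      · subst hc; simp [pvTokens, ih]
      · simp [pvTokens, hc, ih]

theorem pvTokens_no_space (x : List Char) : ∀ (p : List Char), ' ' ∉ x → pvTokens p x = [p ++ x] := by
  induction x with
  | nil => intro p _; simp [pvTokens]
  | cons c t ih =>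
      intro p h
      have hc : c ≠ ' ' := fun hh => h (by simp [hh])
      simp [pvTokens, hc, ih (p ++ [c]) (fun hh => h (List.mem_cons_of_mem _ hh))]

-- membership in the token list yields a boundary decomposition
theorem pvMem_tokens_decomp (s : List Char) : ∀ (p w : List Char), w ∈ pvTokens p s →
    ∃ a b, p ++ s = a ++ w ++ b ∧ (a = [] ∨ ∃ a', a = a' ++ [' ']) ∧ (b = [] ∨ ∃ b', b = ' ' :: b') := by
  induction s with
  | nil =>
      intro p w hw
      simp [pvTokens] at hw
      exact ⟨[], [], by simp [hw], Or.inl rfl, Or.inl rfl⟩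
  | cons c t ih =>
      intro p w hw
      by_cases hc : c = ' '
      · subst hc
        simp only [pvTokens, reduceIte, List.mem_cons] at hw
        rcases hw with rfl | hw
        · exact ⟨[], ' ' :: t, by simp, Or.inl rfl, Or.inr ⟨t, rfl⟩⟩
        · obtain ⟨a, b, heq, ha, hb⟩ := ih [] w hw
          simp only [List.nil_append] at heq
          refine ⟨p ++ [' '] ++ a, b, by simp [heq], Or.inr ?_, hb⟩
          rcases ha with rfl | ⟨a', rfl⟩
          · exact ⟨p, by simp⟩
          · exact ⟨p ++ [' '] ++ a', by simp⟩
      · simp only [pvTokens, if_neg hc] at hw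
        obtain ⟨a, b, heq, ha, hb⟩ := ih (p ++ [c]) w hw
        exact ⟨a, b, by simpa using heq, ha, hb⟩

-- a boundary decomposition yields membership in the token list
theorem pvDecomp_mem_tokens (w : List Char) (hw : ' ' ∉ w) :
    ∀ (a b : List Char), (a = [] ∨ ∃ a', a = a' ++ [' ']) → (b = [] ∨ ∃ b', b = ' ' :: b') →
    w ∈ pvTokens [] (a ++ w ++ b) := by
  have base : ∀ b : List Char, (b = [] ∨ ∃ b', b = ' ' :: b') → w ∈ pvTokens [] (w ++ b) := by
    intro b hb
    rcases hb with rfl | ⟨b', rfl⟩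
    · simp [pvTokens_no_space w [] hw]
    · rw [pvTokens_append_space w [] b', pvTokens_no_space w [] hw]
      simp
  intro a b ha hb
  rcases ha with rfl | ⟨a', rfl⟩
  · simpa using base b hb
  · have : a' ++ [' '] ++ w ++ b = a' ++ ' ' :: (w ++ b) := by simp
    rw [this, pvTokens_append_space a' [] (w ++ b)]
    exact List.mem_append_right _ (base b hb)

-- the key lemma: " w " occurs in " s "  ↔  w is a space-delimited token of s
theorem pvIsIn_iff_token (w s : List Char) (hw : ' ' ∉ w) (_hne : w ≠ []) :
    PySem.Chars.isIn (' ' :: (w ++ [' '])) (' ' :: (s ++ [' '])) = true ↔ w ∈ pvTokens [] s := by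
  rw [PySem.Chars.isIn_iff_infix]
  constructor
  · rintro ⟨x, y, hxy⟩
    have hdec : ∃ a b, s = a ++ w ++ b ∧ (a = [] ∨ ∃ a', a = a' ++ [' ']) ∧ (b = [] ∨ ∃ b', b = ' ' :: b') := by
      cases x with
      | nil =>
          simp only [List.nil_append, List.cons_append, List.cons.injEq] at hxy
          obtain ⟨-, h2⟩ := hxy
          rcases List.eq_nil_or_concat y with rfl | ⟨y', z, rfl⟩
          · simp only [List.append_nil] at h2
            have := List.append_cancel_right (h2.trans rfl)
            exact ⟨[], [], by simp [this], Or.inl rfl, Or.inl rfl⟩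
          · have h2' : (w ++ [' '] ++ y') ++ [z] = s ++ [' '] := by simpa [List.append_assoc] using h2
            obtain ⟨hs, hz⟩ := List.append_singleton_inj.mp h2'
            exact ⟨[], ' ' :: y', by simp [← hs], Or.inl rfl, Or.inr ⟨y', rfl⟩⟩
      | cons x₀ x' =>
          simp only [List.cons_append, List.cons.injEq] at hxy
          obtain ⟨rfl, h2⟩ := hxy
          rcases List.eq_nil_or_concat y with rfl | ⟨y', z, rfl⟩
          · have h2' : (x' ++ [' '] ++ w) ++ [' '] = s ++ [' '] := by
              simpa [List.append_assoc] using h2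
            have hs : x' ++ [' '] ++ w = s := List.append_cancel_right h2'
            exact ⟨x' ++ [' '], [], by simp [← hs], Or.inr ⟨x', rfl⟩, Or.inl rfl⟩
          · have h2' : (x' ++ [' '] ++ w ++ [' '] ++ y') ++ [z] = s ++ [' '] := by
              simpa [List.append_assoc] using h2
            obtain ⟨hs, hz⟩ := List.append_singleton_inj.mp h2'
            exact ⟨x' ++ [' '], ' ' :: y', by simp [← hs, List.append_assoc], Or.inr ⟨x', rfl⟩, Or.inr ⟨y', rfl⟩⟩
    obtain ⟨a, b, rfl, ha, hb⟩ := hdec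
    exact pvDecomp_mem_tokens w hw a b ha hb
  · intro hmem
    obtain ⟨a, b, heq, ha, hb⟩ := pvMem_tokens_decomp s [] w (by simpa using hmem)
    simp only [List.nil_append] at heq
    subst heq
    rcases ha with rfl | ⟨a', rfl⟩
    · rcases hb with rfl | ⟨b', rfl⟩
      · exact ⟨[], [], by simp⟩
      · exact ⟨[], b' ++ [' '], by simp⟩
    · rcases hb with rfl | ⟨b', rfl⟩
      · exact ⟨' ' :: a', [], by simp⟩
      · exact ⟨' ' :: a', b' ++ [' '], by simp⟩

-- the two final checks agree on every single statement
theorem pvFinal_eq (s : List Char) :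
    (!(pvDangerousA.any (fun kw => PySem.Chars.isIn kw (' ' :: (s ++ [' '])))))
      = PySem.Set.isdisjoint pvDangerSet (PySem.Chars.splitOn s [' ']) := by
  rw [PySem.Set.isdisjoint, pvSplitOn_space, pvDangerSet_eq, pvDangerousA_eq, List.any_map]
  apply congrArg
  apply PySem.List.any_congr_mem
  intro w hmem
  obtain ⟨h1, h2⟩ := pvWords_ok w hmem
  simp only [Function.comp_apply]
  rw [Bool.eq_iff_iff]
  rw [pvIsIn_iff_token w s h1 h2]
  simp [PySem.Set.contains]

-- ===== VERDICT (by name: the statement is the Claim_ definition above) =====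
theorem is_safe_read_sql_py_spec : Claim_equal_is_safe_read_sql_py := by
  intro statement _
  unfold Spec_is_safe_read_sql_py
  have halt : is_safe_read_sql_py_alt statement =
      (match pvSegsA statement with
       | [single] =>
          if PySem.Chars.startswith single "select".toList
              || PySem.Chars.startswith single "with".toList then
            PySem.Set.isdisjoint pvDangerSet (PySem.Chars.splitOn single [' '])
          else false
       | _ => false) := by
    show (match (PySem.Chars.splitOn
          (PySem.Chars.strip (PySem.Chars.lower (statement.getD "").toList)) [';']).foldr
        (fun part acc => let seg := PySem.Chars.strip part;
          if seg = [] then acc else seg :: acc) [] with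
      | [single] =>
          if PySem.Chars.startswith single "select".toList
              || PySem.Chars.startswith single "with".toList then
            PySem.Set.isdisjoint pvDangerSet (PySem.Chars.splitOn single [' '])
          else false
      | _ => false) = _
    rw [pvStrip_lower, pvFoldr_segs]
    rfl
  rw [halt]
  unfold is_safe_read_sql_py
  rcases hsegs : pvSegsA statement with _ | ⟨single, rest⟩
  · simp
  · rcases rest with _ | ⟨y, t⟩
    · by_cases hn : pvNormA statement = []
      · exact absurd (pvSegs_of_norm_nil statement hn) (by simp [hsegs])
      · rw [if_neg hn, if_neg (show ¬(([single] : List (List Char)).length ≠ 1) by simp)]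
        show (if (!(PySem.Chars.startswith single "select".toList
              || PySem.Chars.startswith single "with".toList)) = true then false
            else !(pvDangerousA.any fun kw => PySem.Chars.isIn kw ([' '] ++ single ++ [' '])))
          = (if (PySem.Chars.startswith single "select".toList
              || PySem.Chars.startswith single "with".toList) = true then
              PySem.Set.isdisjoint pvDangerSet (PySem.Chars.splitOn single [' '])
            else false)
        cases hx : (PySem.Chars.startswith single "select".toList
            || PySem.Chars.startswith single "with".toList)
        · rfl
        · exact pvFinal_eq single
    · simp
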